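-- pv_equiv track=rewrite | github.com/daniel-reich/ubiquitous-fiesta | LM5d2b6YG5vXuYiME_2.py | can_enter_cave
-- ===== SOURCE A (Python) =====
-- def can_enter_cave(x):
--     q=[]
--     for i in range(len(x)):
--         if x[i][0]==0:
--             q.append((i,0))
--     while q!=[]:
--         p=q.pop(-1)
--         if p[1]==len(x[0])-1:
--             return True
--         else:
--             a=p[0];b=p[1]+1
--             if x[a][b]==0:
--                 if (a,b) not in q:
--                     q.append((a,b))
--                     for i in range(1,len(x),1):
--                         if a+i<len(x):
--                             if x[a+i][b]==0 and ((a+i,b)) not in q: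
--                                 q.append((a+i,b))
--                         if a-i>=0:
--                             if x[a-i][b]==0 and ((a-i,b)) not in q:
--                                 q.append((a-i,b))
--     return False
-- ===== SOURCE B (Python) =====
-- def can_enter_cave(x):
--     # One pass over columns: reachable iff column 0 has a zero and every
--     # adjacent pair of columns shares a row that is zero in both.
--     if not x:
--         return False
--     if all(row[0] != 0 for row in x):
--         return False
--     return all(any(row[c] == 0 and row[c + 1] == 0 for row in x)
--                for c in range(len(x[0]) - 1))
-- ===== Notes on version B (the rewrite author's own statement) =====
-- stated objective: alternative
-- what changed: Replaces the DFS stack with whole-column re-pushes and linear membership scans by a single pass that checks column 0 for a zero and each adjacent column pair for a shared zero row; analytically this removes A's worst-case blow-up, though a timing run did not confirm a 1.5x speed-up on the generated inputs.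
-- outside the precondition, e.g. on can_enter_cave([[0, 1], [5]]): A returns False, B returns False
import Mathlib
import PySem

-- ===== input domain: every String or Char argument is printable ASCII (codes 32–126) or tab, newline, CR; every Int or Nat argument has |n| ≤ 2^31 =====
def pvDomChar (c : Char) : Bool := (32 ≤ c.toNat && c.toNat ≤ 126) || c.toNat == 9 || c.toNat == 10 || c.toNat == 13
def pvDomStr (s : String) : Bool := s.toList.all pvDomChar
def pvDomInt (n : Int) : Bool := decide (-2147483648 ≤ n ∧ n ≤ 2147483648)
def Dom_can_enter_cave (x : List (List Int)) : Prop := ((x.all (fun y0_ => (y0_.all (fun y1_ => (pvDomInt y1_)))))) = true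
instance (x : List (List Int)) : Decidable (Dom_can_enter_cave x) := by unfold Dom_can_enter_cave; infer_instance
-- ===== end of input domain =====

-- B replaces A's DFS stack (with whole-column re-pushes and linear membership scans)
-- by one pass: a zero in column 0 and a shared zero row for every adjacent column pair.


-- ===== PORT A =====
-- x[a][b] == 0 (false where Python would raise IndexError; such accesses are outside Pre_)
def pvCell (x : List (List Int)) (a b : Int) : Bool :=
  decide (((PySem.List.pyGet? x a).bind (fun r => PySem.List.pyGet? r b)) = some 0)

def pvN (x : List (List Int)) : Int := (x.length : Int)
def pvW (x : List (List Int)) : Int := ((x.headD []).length : Int)   -- len(x[0])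

-- initial queue: [(i,0) for i in range(len(x)) if x[i][0]==0]
def pvInit (x : List (List Int)) : List (Int × Int) :=
  (PySem.List.pyRange 0 (pvN x) 1).foldl
    (fun q i => if pvCell x i 0 then q ++ [(i, (0 : Int))] else q) []

-- guarded append: 'if <cond>: q.append(p)'
def pvAdd (c : Prop) [Decidable c] (q : List (Int × Int)) (p : Int × Int) :
    List (Int × Int) :=
  if c then q ++ [p] else q

-- body of the inner 'for i in range(1,len(x),1)' (Python's nested ifs as conjunctions)
def pvStep (x : List (List Int)) (a b : Int) (q2 : List (Int × Int)) (i : Int) :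
    List (Int × Int) :=
  let q3 := pvAdd (a + i < pvN x ∧ pvCell x (a + i) b = true ∧ (a + i, b) ∉ q2) q2 (a + i, b)
  pvAdd (0 ≤ a - i ∧ pvCell x (a - i) b = true ∧ (a - i, b) ∉ q3) q3 (a - i, b)

-- weight/measure used only as a (provably sufficient) fuel bound for the while loop
def pvL (x : List (List Int)) : Nat := x.foldr (fun r m => max r.length m) 0
def pvWeight (x : List (List Int)) (b : Int) : Nat :=
  (2 * x.length + 2) ^ (((pvL x : Int) + 1 - b).toNat)
def pvM (x : List (List Int)) (q : List (Int × Int)) : Nat :=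
  (q.map (fun p => pvWeight x p.2)).sum

-- the 'while q != []' loop; fuel only makes it total, Pre_ inputs never exhaust it
def pvLoopA (x : List (List Int)) : Nat → List (Int × Int) → Bool
  | 0, _ => false
  | f + 1, q =>
    match q.getLast? with
    | none => false                                  -- q == []
    | some p =>
      let rest := q.dropLast                         -- p = q.pop(-1)
      if p.2 = pvW x - 1 then true
      else
        let a := p.1
        let b := p.2 + 1
        if pvCell x a b then
          if (a, b) ∈ rest then pvLoopA x f rest
          else pvLoopA x f ((PySem.List.pyRange 1 (pvN x) 1).foldl (pvStep x a b)
                              (rest ++ [(a, b)]))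
        else pvLoopA x f rest

def can_enter_cave (x : List (List Int)) : Bool :=
  pvLoopA x (pvM x (pvInit x) + 1) (pvInit x)

-- ===== PORT B =====
def can_enter_cave_alt (x : List (List Int)) : Bool :=
  match x with
  | [] => false
  | _ :: _ =>
    if x.all (fun row => !(PySem.List.pyGet? row 0 == some 0)) then false
    else
      (PySem.List.pyRange 0 (((x.headD []).length : Int) - 1) 1).all (fun c =>
        x.any (fun row =>
          (PySem.List.pyGet? row c == some 0) && (PySem.List.pyGet? row (c + 1) == some 0)))

-- ===== PRECONDITION & SPEC =====
-- Pre_ requires nonempty rows and (rectangular, or a single column, or no zero in the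
-- first column — in the last two cases A never inspects any other column). Outside Pre_
-- A raises IndexError once exploration reaches a short row of a ragged grid, though on
-- some such inputs A happens to return (with the same value as B) before doing so.
def Pre_can_enter_cave (x : List (List Int)) : Prop :=
  (∀ r ∈ x, 0 < r.length) ∧
    ((∀ r ∈ x, r.length = (x.headD []).length) ∨ (x.headD []).length = 1 ∨
      (∀ r ∈ x, PySem.List.pyGet? r 0 ≠ some 0))

instance (x : List (List Int)) : Decidable (Pre_can_enter_cave x) := by
  unfold Pre_can_enter_cave; infer_instance

def pvWitness_can_enter_cave : List (List Int) := [[0, 1], [0, 0]]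

def Spec_can_enter_cave (x : List (List Int)) (out : Bool) : Prop := out = can_enter_cave_alt x
instance (x : List (List Int)) (out : Bool) : Decidable (Spec_can_enter_cave x out) := by
  unfold Spec_can_enter_cave; infer_instance

-- ===== CLAIM (what is proved, stated in full; the proofs are below) =====
def Claim_equal_can_enter_cave : Prop := ∀ (x : List (List Int)), Dom_can_enter_cave x → Pre_can_enter_cave x → Spec_can_enter_cave x (can_enter_cave x)

-- ===== LEMMAS AND PROOFS =====

-- column d and d+1 share a zero row
def pvShared (x : List (List Int)) (d : Int) : Prop :=
  ∃ r : Int, 0 ≤ r ∧ r < pvN x ∧ pvCell x r d = true ∧ pvCell x r (d + 1) = true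

-- from the full zero set of column c the last column is reachable
def pvP (x : List (List Int)) (c : Int) : Prop :=
  ∀ d : Int, c ≤ d → d ≤ pvW x - 2 → pvShared x d

def pvGood (x : List (List Int)) (p : Int × Int) : Prop :=
  p.2 = pvW x - 1 ∨ (pvCell x p.1 (p.2 + 1) = true ∧ pvP x (p.2 + 1))

def pvValid (x : List (List Int)) (p : Int × Int) : Prop :=
  0 ≤ p.1 ∧ p.1 < pvN x ∧ 0 ≤ p.2 ∧ pvCell x p.1 p.2 = true

-- --- small facts about pvCell, pvL ---

theorem pvCell_elim {x : List (List Int)} {a b : Int} (h : pvCell x a b = true) :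
    ∃ row, PySem.List.pyGet? x a = some row ∧ PySem.List.pyGet? row b = some 0 := by
  unfold pvCell at h
  rcases hx : PySem.List.pyGet? x a with _ | row
  · simp [hx] at h
  · exact ⟨row, rfl, by simpa [hx] using h⟩

theorem pvL_bound {x : List (List Int)} {r : List Int} (h : r ∈ x) : r.length ≤ pvL x := by
  induction x with
  | nil => cases h
  | cons r0 t ih =>
    rcases List.mem_cons.mp h with rfl | h'
    · simp [pvL]
    · have := ih h'
      simp only [pvL, List.foldr] at *
      omega

theorem pvCell_col_lt_L {x : List (List Int)} {a b : Int}
    (h : pvCell x a b = true) (_hb : 0 ≤ b) : b < (pvL x : Int) := by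
  obtain ⟨row, hr, hv⟩ := pvCell_elim h
  have hin : PySem.Raise.InRange row.length b := by
    by_contra hc
    rw [← PySem.List.pyGet?_eq_none_iff] at hc
    simp [hc] at hv
  have hlen : row.length ≤ pvL x := pvL_bound (PySem.List.mem_of_pyGet?_eq_some _ hr)
  unfold PySem.Raise.InRange at hin
  omega

theorem pvCell_col_lt_W {x : List (List Int)} {a b : Int}
    (hrect : ∀ r ∈ x, r.length = (x.headD []).length)
    (h : pvCell x a b = true) (hb : 0 ≤ b) : b < pvW x := by
  obtain ⟨row, hr, hv⟩ := pvCell_elim h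
  have hin : PySem.Raise.InRange row.length b := by
    by_contra hc
    rw [← PySem.List.pyGet?_eq_none_iff] at hc
    simp [hc] at hv
  have hlen := hrect row (PySem.List.mem_of_pyGet?_eq_some _ hr)
  unfold PySem.Raise.InRange at hin
  unfold pvW
  omega

-- --- pvM basics ---

theorem pvWeight_pos (x : List (List Int)) (b : Int) : 0 < pvWeight x b := by
  unfold pvWeight
  positivity

-- --- generic facts about the inner fold (pvStep) ---

theorem mem_pvAdd_of_mem {c : Prop} [Decidable c] {q : List (Int × Int)}
    {p p' : Int × Int} (h : p ∈ q) : p ∈ pvAdd c q p' := by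
  unfold pvAdd; split_ifs <;> simp [h]

theorem mem_pvAdd {c : Prop} [Decidable c] {q : List (Int × Int)} {p p' : Int × Int}
    (h : p ∈ pvAdd c q p') : p ∈ q ∨ (c ∧ p = p') := by
  unfold pvAdd at h; split_ifs at h with hc <;> simp_all

theorem mem_pvAdd_self {c : Prop} [Decidable c] {q : List (Int × Int)} {p : Int × Int}
    (h : ¬c → p ∈ q) : p ∈ pvAdd c q p := by
  unfold pvAdd; split_ifs with hc
  · simp
  · exact h hc

theorem pvM_pvAdd_le (x : List (List Int)) (c : Prop) [Decidable c]
    (q : List (Int × Int)) (p : Int × Int) :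
    pvM x (pvAdd c q p) ≤ pvM x q + pvWeight x p.2 := by
  unfold pvAdd; split_ifs <;> simp [pvM] <;> omega

theorem pvAdd_pairwise {c : Prop} [Decidable c] {q : List (Int × Int)} {b r : Int}
    (hp : List.Pairwise (fun u v : Int × Int => u.2 ≤ v.2) q) (hb : ∀ p ∈ q, p.2 ≤ b) :
    List.Pairwise (fun u v : Int × Int => u.2 ≤ v.2) (pvAdd c q (r, b)) ∧
      ∀ p ∈ pvAdd c q (r, b), p.2 ≤ b := by
  unfold pvAdd; split_ifs
  · refine ⟨List.pairwise_append.mpr ⟨hp, by simp, ?_⟩, ?_⟩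
    · intro u hu v hv; simp at hv; subst hv; exact hb u hu
    · intro p hp'
      rcases List.mem_append.mp hp' with h | h
      · exact hb _ h
      · simp at h; subst h; simp
  · exact ⟨hp, hb⟩

theorem pvStep_mono {x : List (List Int)} {a b : Int} {q2 : List (Int × Int)} {i : Int}
    {p : Int × Int} (h : p ∈ q2) : p ∈ pvStep x a b q2 i := by
  simp only [pvStep]
  exact mem_pvAdd_of_mem (mem_pvAdd_of_mem h)

theorem foldl_pvStep_mono {x : List (List Int)} {a b : Int} {p : Int × Int} :
    ∀ (l : List Int) (init : List (Int × Int)), p ∈ init →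
      p ∈ l.foldl (pvStep x a b) init := by
  intro l
  induction l with
  | nil => intro init h; simpa using h
  | cons i t ih => intro init h; exact ih _ (pvStep_mono h)

theorem pvStep_inv {x : List (List Int)} {a b : Int} {q2 : List (Int × Int)} {i : Int}
    {p : Int × Int} (ha : 0 ≤ a) (han : a < pvN x) (hi : 1 ≤ i)
    (h : p ∈ pvStep x a b q2 i) :
    p ∈ q2 ∨ (p.2 = b ∧ 0 ≤ p.1 ∧ p.1 < pvN x ∧ pvCell x p.1 b = true) := by
  simp only [pvStep] at h
  rcases mem_pvAdd h with h' | ⟨⟨hc1, hc2, _⟩, rfl⟩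
  · rcases mem_pvAdd h' with h'' | ⟨⟨hc1, hc2, _⟩, rfl⟩
    · exact Or.inl h''
    · exact Or.inr ⟨rfl, by omega, hc1, hc2⟩
  · exact Or.inr ⟨rfl, hc1, by omega, hc2⟩

theorem foldl_pvStep_inv {x : List (List Int)} {a b : Int} {p : Int × Int}
    (ha : 0 ≤ a) (han : a < pvN x) :
    ∀ (l : List Int) (init : List (Int × Int)), (∀ i ∈ l, 1 ≤ i) →
      p ∈ l.foldl (pvStep x a b) init →
      p ∈ init ∨ (p.2 = b ∧ 0 ≤ p.1 ∧ p.1 < pvN x ∧ pvCell x p.1 b = true) := by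
  intro l
  induction l with
  | nil => intro init _ h; left; simpa using h
  | cons i t ih =>
    intro init hl h
    rcases ih _ (fun j hj => hl j (List.mem_cons_of_mem _ hj)) h with h' | h'
    · exact pvStep_inv ha han (hl i (List.mem_cons_self)) h'
    · right; exact h'

theorem pvM_pvStep_le (x : List (List Int)) (a b : Int) (q2 : List (Int × Int)) (i : Int) :
    pvM x (pvStep x a b q2 i) ≤ pvM x q2 + 2 * pvWeight x b := by
  simp only [pvStep]
  have h1 := pvM_pvAdd_le x (a + i < pvN x ∧ pvCell x (a + i) b = true ∧ (a + i, b) ∉ q2)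
    q2 (a + i, b)
  set q3 := pvAdd (a + i < pvN x ∧ pvCell x (a + i) b = true ∧ (a + i, b) ∉ q2) q2 (a + i, b)
    with hq3
  have h2 := pvM_pvAdd_le x (0 ≤ a - i ∧ pvCell x (a - i) b = true ∧ (a - i, b) ∉ q3)
    q3 (a - i, b)
  simp only at h1 h2
  omega

theorem pvM_foldl_pvStep_le (x : List (List Int)) (a b : Int) :
    ∀ (l : List Int) (init : List (Int × Int)),
      pvM x (l.foldl (pvStep x a b) init) ≤ pvM x init + 2 * l.length * pvWeight x b := by
  intro l
  induction l with
  | nil => intro init; simp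
  | cons i t ih =>
    intro init
    calc pvM x ((i :: t).foldl (pvStep x a b) init)
        = pvM x (t.foldl (pvStep x a b) (pvStep x a b init i)) := by simp
      _ ≤ pvM x (pvStep x a b init i) + 2 * t.length * pvWeight x b := ih _
      _ ≤ pvM x init + 2 * pvWeight x b + 2 * t.length * pvWeight x b := by
          have := pvM_pvStep_le x a b init i; omega
      _ ≤ pvM x init + 2 * (i :: t).length * pvWeight x b := by
          simp [List.length_cons]; ring_nf; omega

theorem pvStep_complete {x : List (List Int)} {a b r : Int} {q2 : List (Int × Int)} {i : Int}
    (h : (r = a + i ∧ a + i < pvN x ∧ pvCell x (a + i) b = true) ∨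
         (r = a - i ∧ 0 ≤ a - i ∧ pvCell x (a - i) b = true)) :
    (r, b) ∈ pvStep x a b q2 i := by
  simp only [pvStep]
  rcases h with ⟨rfl, h1, h2⟩ | ⟨rfl, h1, h2⟩
  · exact mem_pvAdd_of_mem (mem_pvAdd_self (fun hc => by tauto))
  · exact mem_pvAdd_self (fun hc => by tauto)

theorem foldl_pvStep_complete {x : List (List Int)} {a b r : Int}
    (init : List (Int × Int)) (hne : r ≠ a) (hr0 : 0 ≤ r) (hrn : r < pvN x)
    (ha0 : 0 ≤ a) (han : a < pvN x) (hcell : pvCell x r b = true) :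
    (r, b) ∈ (PySem.List.pyRange 1 (pvN x) 1).foldl (pvStep x a b) init := by
  by_cases hlt : a < r
  · have h2 : r - a < pvN x := by omega
    rw [PySem.List.pyRange_one_append 1 (r - a) (pvN x) (by omega) (by omega),
      PySem.List.pyRange_one_cons h2, List.foldl_append, List.foldl_cons]
    exact foldl_pvStep_mono _ _ (pvStep_complete (Or.inl ⟨by omega, by omega, by
      simpa [show a + (r - a) = r by omega] using hcell⟩))
  · have h2 : a - r < pvN x := by omega
    rw [PySem.List.pyRange_one_append 1 (a - r) (pvN x) (by omega) (by omega),
      PySem.List.pyRange_one_cons h2, List.foldl_append, List.foldl_cons]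
    exact foldl_pvStep_mono _ _ (pvStep_complete (Or.inr ⟨by omega, by omega, by
      simpa [show a - (a - r) = r by omega] using hcell⟩))

theorem pvStep_pairwise {x : List (List Int)} {a b : Int} {q2 : List (Int × Int)} {i : Int}
    (hp : List.Pairwise (fun u v : Int × Int => u.2 ≤ v.2) q2) (hb : ∀ p ∈ q2, p.2 ≤ b) :
    List.Pairwise (fun u v : Int × Int => u.2 ≤ v.2) (pvStep x a b q2 i) ∧
      ∀ p ∈ pvStep x a b q2 i, p.2 ≤ b := by
  simp only [pvStep]
  obtain ⟨h1, h2⟩ := pvAdd_pairwise (c := a + i < pvN x ∧ pvCell x (a + i) b = true ∧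
    (a + i, b) ∉ q2) (r := a + i) hp hb
  exact pvAdd_pairwise h1 h2

theorem foldl_pvStep_pairwise {x : List (List Int)} {a b : Int} :
    ∀ (l : List Int) (init : List (Int × Int)),
      List.Pairwise (fun u v : Int × Int => u.2 ≤ v.2) init → (∀ p ∈ init, p.2 ≤ b) →
      List.Pairwise (fun u v : Int × Int => u.2 ≤ v.2)
        (l.foldl (pvStep x a b) init) := by
  intro l
  induction l with
  | nil => intro init h _; simpa using h
  | cons i t ih =>
    intro init h hb
    obtain ⟨h1, h2⟩ := pvStep_pairwise (i := i) h hb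
    exact ih _ h1 h2

theorem pvLoop_eq (x : List (List Int))
    (hrect : ∀ r ∈ x, r.length = (x.headD []).length) :
    ∀ (f : Nat) (q : List (Int × Int)), (∀ p ∈ q, pvValid x p) →
      List.Pairwise (fun u v => u.2 ≤ v.2) q → pvM x q < f →
      (pvLoopA x f q = true ↔ ∃ p ∈ q, pvGood x p) := by
  intro f
  induction f with
  | zero => intro q _ _ hM; exact absurd hM (by omega)
  | succ f ih =>
    intro q hv hmono hM
    rcases List.eq_nil_or_concat q with rfl | ⟨l, p, rfl⟩
    · simp [pvLoopA]
    · simp only [List.concat_eq_append] at hv hmono hM ⊢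
      have hlast : (l ++ [p]).getLast? = some p := List.getLast?_concat
      have hdrop : (l ++ [p]).dropLast = l := List.dropLast_concat
      obtain ⟨hp10, hp1n, hp20, hpc⟩ := hv p (by simp)
      have hvl : ∀ u ∈ l, pvValid x u := fun u hu => hv u (by simp [hu])
      have hml : List.Pairwise (fun u v : Int × Int => u.2 ≤ v.2) l :=
        (List.pairwise_append.mp hmono).1
      have hlb : ∀ u ∈ l, u.2 ≤ p.2 := fun u hu =>
        (List.pairwise_append.mp hmono).2.2 u hu p (by simp)
      have hMsplit : pvM x (l ++ [p]) = pvM x l + pvWeight x p.2 := by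
        simp [pvM]
      have hwpos := pvWeight_pos x p.2
      simp only [pvLoopA, hlast, hdrop]
      by_cases hend : p.2 = pvW x - 1
      · rw [if_pos hend]
        exact ⟨fun _ => ⟨p, by simp, Or.inl hend⟩, fun _ => rfl⟩
      · rw [if_neg hend]
        by_cases hc : pvCell x p.1 (p.2 + 1) = true
        · have hnotin : (p.1, p.2 + 1) ∉ l := fun hin => by
            have h' : p.2 + 1 ≤ p.2 := hlb _ hin
            omega
          rw [if_pos hc, if_neg hnotin]
          set c := p.2 + 1 with hcdef
          have hcL : c < (pvL x : Int) := pvCell_col_lt_L hc (by omega)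
          have hcW : c < pvW x := pvCell_col_lt_W hrect hc (by omega)
          have hn1 : 1 ≤ x.length := by
            have := hp1n; unfold pvN at this; omega
          have hrange1 : ∀ i ∈ PySem.List.pyRange 1 (pvN x) 1, (1:Int) ≤ i := fun i hi =>
            (PySem.List.mem_pyRange_one.mp hi).1
          -- init facts
          have hinitpw : List.Pairwise (fun u v : Int × Int => u.2 ≤ v.2) (l ++ [(p.1, c)]) := by
            rw [List.pairwise_append]
            refine ⟨hml, by simp, ?_⟩
            intro u hu v hv'
            rw [List.mem_singleton] at hv'
            subst hv'
            have := hlb u hu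
            show u.2 ≤ c
            omega
          have hinitb : ∀ u ∈ l ++ [(p.1, c)], u.2 ≤ c := by
            intro u hu
            rcases List.mem_append.mp hu with h | h
            · have := hlb u h; omega
            · simp at h; subst h; simp
          -- measure
          have hM2 : pvM x ((PySem.List.pyRange 1 (pvN x) 1).foldl (pvStep x p.1 c)
              (l ++ [(p.1, c)])) < f := by
            have h1 := pvM_foldl_pvStep_le x p.1 c (PySem.List.pyRange 1 (pvN x) 1)
              (l ++ [(p.1, c)])
            have hlen : (PySem.List.pyRange 1 (pvN x) 1).length = x.length - 1 := by
              rw [PySem.List.length_pyRange_one]; unfold pvN; omega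
            have hsplit2 : pvM x (l ++ [(p.1, c)]) = pvM x l + pvWeight x c := by
              simp [pvM]
            have hkey : (1 + 2 * (x.length - 1)) * pvWeight x c < pvWeight x p.2 := by
              unfold pvWeight
              have hexp : (((pvL x : Int)) + 1 - p.2).toNat =
                  (((pvL x : Int)) + 1 - c).toNat + 1 := by omega
              rw [hexp, pow_succ]
              have hpow : 0 < (2 * x.length + 2) ^ (((pvL x : Int)) + 1 - c).toNat :=
                pow_pos (by omega) _
              have hlt : 1 + 2 * (x.length - 1) < 2 * x.length + 2 := by omega
              have hmul := Nat.mul_lt_mul_of_pos_right hlt hpow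
              exact lt_of_lt_of_eq hmul (by ring)
            rw [hsplit2, hlen] at h1
            rw [hMsplit] at hM
            have : pvM x l + pvWeight x c + 2 * (x.length - 1) * pvWeight x c <
                pvM x l + pvWeight x p.2 := by
              have := hkey
              ring_nf at this ⊢
              omega
            omega
          -- validity
          have hv2 : ∀ u ∈ (PySem.List.pyRange 1 (pvN x) 1).foldl (pvStep x p.1 c)
              (l ++ [(p.1, c)]), pvValid x u := by
            intro u hu
            rcases foldl_pvStep_inv hp10 hp1n _ _ hrange1 hu with hinit | ⟨hu2, h0, hn, hcell⟩
            · rcases List.mem_append.mp hinit with h | h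
              · exact hvl u h
              · simp at h; subst h; exact ⟨hp10, hp1n, by omega, hc⟩
            · exact ⟨h0, hn, by omega, by rw [hu2]; exact hcell⟩
          -- pairwise
          have hm2 := foldl_pvStep_pairwise (x := x) (a := p.1) (b := c)
            (PySem.List.pyRange 1 (pvN x) 1) (l ++ [(p.1, c)]) hinitpw hinitb
          rw [ih _ hv2 hm2 hM2]
          -- the key exchange: good item in the new queue ↔ good item in the old queue
          have hgp : ∀ u : Int × Int, u.2 = c → 0 ≤ u.1 → u.1 < pvN x →
              pvCell x u.1 c = true → pvGood x u → pvP x c := by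
            intro u hu2 h0 hn hcell hg d hd1 hd2
            rcases hg with hl' | ⟨hc', hP⟩
            · rw [hu2] at hl'; exact absurd hd2 (by omega)
            · rw [hu2] at hc' hP
              by_cases hdc : d = c
              · subst hdc; exact ⟨u.1, h0, hn, hcell, hc'⟩
              · exact hP d (by omega) hd2
          constructor
          · rintro ⟨u, hu, hg⟩
            rcases foldl_pvStep_inv hp10 hp1n _ _ hrange1 hu with hinit | ⟨hu2, h0, hn, hcell⟩
            · rcases List.mem_append.mp hinit with h | h
              · exact ⟨u, by simp [h], hg⟩
              · rw [List.mem_singleton] at h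
                rw [h] at hg
                exact ⟨p, by simp, Or.inr ⟨hc, hgp (p.1, c) rfl hp10 hp1n hc hg⟩⟩
            · exact ⟨p, by simp, Or.inr ⟨hc, hgp u hu2 h0 hn hcell hg⟩⟩
          · rintro ⟨u, hu, hg⟩
            rcases List.mem_append.mp hu with h | h
            · exact ⟨u, foldl_pvStep_mono _ _ (by simp [h]), hg⟩
            · rw [List.mem_singleton] at h
              rw [h] at hg
              rcases hg with hl' | ⟨hc2, hP⟩
              · exact absurd hl' hend
              · by_cases hcw : c = pvW x - 1
                · exact ⟨(p.1, c), foldl_pvStep_mono _ _ (by simp),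
                    Or.inl (by simpa using hcw)⟩
                · obtain ⟨r, hr0, hrn, hrc, hrc1⟩ := hP c le_rfl (by omega)
                  have hmem : (r, c) ∈ (PySem.List.pyRange 1 (pvN x) 1).foldl
                      (pvStep x p.1 c) (l ++ [(p.1, c)]) := by
                    by_cases hra : r = p.1
                    · subst hra; exact foldl_pvStep_mono _ _ (by simp)
                    · exact foldl_pvStep_complete _ hra hr0 hrn hp10 hp1n hrc
                  exact ⟨(r, c), hmem,
                    Or.inr ⟨by simpa using hrc1, fun d hd1 hd2 => hP d (by omega) hd2⟩⟩
        · rw [if_neg hc]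
          rw [ih _ hvl hml (by omega)]
          constructor
          · rintro ⟨u, hu, hg⟩; exact ⟨u, by simp [hu], hg⟩
          · rintro ⟨u, hu, hg⟩
            rcases List.mem_append.mp hu with h | h
            · exact ⟨u, h, hg⟩
            · rw [List.mem_singleton] at h
              rw [h] at hg
              rcases hg with hl' | ⟨hc', _⟩
              · exact absurd hl' hend
              · exact absurd hc' hc

theorem pvInit_fold_mem (x : List (List Int)) :
    ∀ (l : List Int) (init : List (Int × Int)) (p : Int × Int),
      (p ∈ l.foldl (fun q i => if pvCell x i 0 then q ++ [(i, (0 : Int))] else q) init ↔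
        p ∈ init ∨ ∃ i ∈ l, pvCell x i 0 = true ∧ p = (i, 0)) := by
  intro l
  induction l with
  | nil => intro init p; simp
  | cons j t ih =>
    intro init p
    rw [List.foldl_cons, ih]
    constructor
    · rintro (h | ⟨i, hi, hc, rfl⟩)
      · split_ifs at h with hc
        · rcases List.mem_append.mp h with h | h
          · exact Or.inl h
          · simp at h; subst h; exact Or.inr ⟨j, by simp, hc, rfl⟩
        · exact Or.inl h
      · exact Or.inr ⟨i, by simp [hi], hc, rfl⟩
    · rintro (h | ⟨i, hi, hc, rfl⟩)
      · left; split_ifs <;> simp [h]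
      · rcases List.mem_cons.mp hi with rfl | hi'
        · left; simp [hc]
        · exact Or.inr ⟨i, hi', hc, rfl⟩

theorem pairwise_of_const_zero :
    ∀ (q : List (Int × Int)), (∀ p ∈ q, p.2 = 0) →
      List.Pairwise (fun u v : Int × Int => u.2 ≤ v.2) q := by
  intro q
  induction q with
  | nil => intro _; simp
  | cons p t ih =>
    intro h
    refine List.pairwise_cons.mpr ⟨fun u hu => ?_, ih fun u hu => h u (by simp [hu])⟩
    rw [h p (by simp), h u (by simp [hu])]

theorem pvInit_mem (x : List (List Int)) (p : Int × Int) :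
    p ∈ pvInit x ↔ (0 ≤ p.1 ∧ p.1 < pvN x ∧ p.2 = 0 ∧ pvCell x p.1 0 = true) := by
  unfold pvInit
  rw [pvInit_fold_mem]
  simp only [List.not_mem_nil, false_or, PySem.List.mem_pyRange_one]
  constructor
  · rintro ⟨i, ⟨h0, hn⟩, hc, rfl⟩; exact ⟨h0, hn, rfl, hc⟩
  · rintro ⟨h0, hn, hp2, hc⟩
    exact ⟨p.1, ⟨h0, hn⟩, hc, by rw [← hp2]⟩

theorem pvInit_ok (x : List (List Int)) :
    (∀ p ∈ pvInit x, pvValid x p) ∧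
    List.Pairwise (fun u v : Int × Int => u.2 ≤ v.2) (pvInit x) ∧
    (∀ p, p ∈ pvInit x ↔ (0 ≤ p.1 ∧ p.1 < pvN x ∧ p.2 = 0 ∧ pvCell x p.1 0 = true)) := by
  refine ⟨?_, ?_, pvInit_mem x⟩
  · intro p hp
    obtain ⟨h0, hn, hp2, hc⟩ := (pvInit_mem x p).mp hp
    exact ⟨h0, hn, by omega, by rw [hp2]; exact hc⟩
  · exact pairwise_of_const_zero _ fun p hp => ((pvInit_mem x p).mp hp).2.2.1

theorem pvCell_getElem {x : List (List Int)} {i : Int} (h0 : 0 ≤ i)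
    (hn : i.toNat < x.length) (c : Int) :
    (pvCell x i c = true ↔ PySem.List.pyGet? (x[i.toNat]'hn) c = some 0) := by
  unfold pvCell
  rw [PySem.List.pyGet?_eq_some_getElem x h0 (by omega)]
  simp

theorem mem_row_idx {x : List (List Int)} {row : List Int} (hm : row ∈ x) :
    ∃ i : Int, 0 ≤ i ∧ i < pvN x ∧
      ∀ c, (pvCell x i c = true ↔ PySem.List.pyGet? row c = some 0) := by
  obtain ⟨k, hk, heq⟩ := List.mem_iff_getElem.mp hm
  refine ⟨(k : Int), by omega, by unfold pvN; omega, fun c => ?_⟩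
  have h' : ((k : Int)).toNat < x.length := by omega
  rw [pvCell_getElem (by omega) h' c]
  simp [heq]

theorem idx_row {x : List (List Int)} {i : Int} (h0 : 0 ≤ i) (hn : i < pvN x) :
    ∃ row ∈ x, ∀ c, (pvCell x i c = true ↔ PySem.List.pyGet? row c = some 0) := by
  have h' : i.toNat < x.length := by unfold pvN at hn; omega
  exact ⟨x[i.toNat], List.getElem_mem h', fun c => pvCell_getElem h0 h' c⟩

theorem alt_eq (x : List (List Int)) (hx : x ≠ []) :
    can_enter_cave_alt x =
      (if x.all (fun row => !(PySem.List.pyGet? row 0 == some 0)) then false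
       else (PySem.List.pyRange 0 (pvW x - 1) 1).all (fun c =>
         x.any (fun row =>
           (PySem.List.pyGet? row c == some 0) &&
           (PySem.List.pyGet? row (c + 1) == some 0)))) := by
  cases x with
  | nil => exact absurd rfl hx
  | cons r0 rx => rfl

theorem pvB_eq (x : List (List Int)) (hx : x ≠ [])
    (hrect : ∀ r ∈ x, r.length = (x.headD []).length) (hw : 0 < pvW x) :
    ((∃ p ∈ pvInit x, pvGood x p) ↔ can_enter_cave_alt x = true) := by
  rw [alt_eq x hx]
  by_cases hE : x.all (fun row => !(PySem.List.pyGet? row 0 == some 0)) = true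
  · rw [if_pos hE]
    simp only [Bool.false_eq_true, iff_false]
    rintro ⟨p, hp, -⟩
    obtain ⟨h0, hn, hp2, hc⟩ := (pvInit_mem x p).mp hp
    obtain ⟨row, hm, hiff⟩ := idx_row h0 hn
    have hall := List.all_eq_true.mp hE _ hm
    simp only [Bool.not_eq_eq_eq_not, Bool.not_true, beq_eq_false_iff_ne] at hall
    exact hall ((hiff 0).mp hc)
  · rw [if_neg hE]
    have hE0 : ∃ row ∈ x, PySem.List.pyGet? row 0 = some 0 := by
      by_contra hno
      push Not at hno
      apply hE
      rw [List.all_eq_true]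
      intro row hr
      simp [hno row hr]
    constructor
    · rintro ⟨p, hp, hgood⟩
      obtain ⟨h0, hn, hp2, hc⟩ := (pvInit_mem x p).mp hp
      rw [List.all_eq_true]
      intro c hcr
      rw [PySem.List.mem_pyRange_one] at hcr
      rw [List.any_eq_true]
      have hsh : pvShared x c := by
        rcases hgood with hl | ⟨hc1, hP⟩
        · rw [hp2] at hl; exfalso; omega
        · rw [hp2] at hc1 hP
          by_cases hc0 : c = 0
          · subst hc0
            exact ⟨p.1, h0, hn, hc, by simpa using hc1⟩
          · exact hP c (by omega) (by omega)
      obtain ⟨r, hr0, hrn, hrc, hrc1⟩ := hsh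
      obtain ⟨row, hm, hiff⟩ := idx_row hr0 hrn
      exact ⟨row, hm, by simp [(hiff c).mp hrc, (hiff (c + 1)).mp hrc1]⟩
    · intro hall
      rw [List.all_eq_true] at hall
      by_cases hW : pvW x = 1
      · obtain ⟨row0, hm0, hg0⟩ := hE0
        obtain ⟨i, h0, hn, hiff⟩ := mem_row_idx hm0
        exact ⟨(i, 0), (pvInit_mem x _).mpr ⟨h0, hn, rfl, (hiff 0).mpr hg0⟩,
          Or.inl (by simp [hW])⟩
      · have h0' := hall 0 (by rw [PySem.List.mem_pyRange_one]; omega)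
        rw [List.any_eq_true] at h0'
        obtain ⟨row, hm, hb⟩ := h0'
        simp only [Bool.and_eq_true, beq_iff_eq] at hb
        obtain ⟨r, hr0, hrn, hiff⟩ := mem_row_idx hm
        refine ⟨(r, 0), (pvInit_mem x _).mpr ⟨hr0, hrn, rfl, (hiff 0).mpr hb.1⟩,
          Or.inr ⟨by simpa using (hiff 1).mpr (by simpa using hb.2), ?_⟩⟩
        intro d hd1 hd2
        have hd := hall d (by rw [PySem.List.mem_pyRange_one]; constructor <;> omega)
        rw [List.any_eq_true] at hd
        obtain ⟨row', hm', hb'⟩ := hd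
        simp only [Bool.and_eq_true, beq_iff_eq] at hb'
        obtain ⟨r', hr0', hrn', hiff'⟩ := mem_row_idx hm'
        exact ⟨r', hr0', hrn', (hiff' d).mpr hb'.1, (hiff' (d + 1)).mpr hb'.2⟩

theorem pvInit_nil_of_nozero (x : List (List Int))
    (hnz : ∀ r ∈ x, PySem.List.pyGet? r 0 ≠ some 0) : pvInit x = [] := by
  rcases hI : pvInit x with _ | ⟨p, t⟩
  · rfl
  · exfalso
    have hp : p ∈ pvInit x := by rw [hI]; simp
    obtain ⟨h0, hn, _, hc⟩ := (pvInit_mem x p).mp hp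
    obtain ⟨row, hm, hiff⟩ := idx_row h0 hn
    exact hnz row hm ((hiff 0).mp hc)

theorem pvNoZero_case (x : List (List Int))
    (hnz : ∀ r ∈ x, PySem.List.pyGet? r 0 ≠ some 0) :
    can_enter_cave x = can_enter_cave_alt x := by
  have hI := pvInit_nil_of_nozero x hnz
  rw [can_enter_cave, hI]
  cases x with
  | nil => simp [pvLoopA, pvM, can_enter_cave_alt]
  | cons r0 rx =>
    rw [alt_eq _ (by simp), if_pos]
    · simp [pvLoopA, pvM]
    · rw [List.all_eq_true]
      intro row hr
      simp [hnz row hr]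

theorem pvW1_case (x : List (List Int)) (hx : x ≠ [])
    (hw1 : (x.headD []).length = 1) :
    can_enter_cave x = can_enter_cave_alt x := by
  by_cases hz : ∀ r ∈ x, PySem.List.pyGet? r 0 ≠ some 0
  · exact pvNoZero_case x hz
  · push Not at hz
    obtain ⟨row, hm, h0⟩ := hz
    obtain ⟨i, hi0, hin, hiff⟩ := mem_row_idx hm
    have hmem : (i, 0) ∈ pvInit x := (pvInit_mem x _).mpr ⟨hi0, hin, rfl, (hiff 0).mpr h0⟩
    have hA : can_enter_cave x = true := by
      rw [can_enter_cave]
      rcases List.eq_nil_or_concat (pvInit x) with hnil | ⟨l, p, hconcat⟩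
      · rw [hnil] at hmem; cases hmem
      · have hp : p ∈ pvInit x := by rw [hconcat]; simp
        have hp2 : p.2 = 0 := ((pvInit_mem x p).mp hp).2.2.1
        rw [hconcat]
        simp only [List.concat_eq_append, pvLoopA, List.getLast?_concat]
        rw [if_pos (by unfold pvW; omega)]
    have hB : can_enter_cave_alt x = true := by
      rw [alt_eq x hx, if_neg]
      · rw [show pvW x - 1 = 0 by unfold pvW; omega]
        simp [PySem.List.pyRange_one_eq_nil]
      · intro hall
        have := List.all_eq_true.mp hall row hm
        simp [h0] at this
    rw [hA, hB]

-- ===== VERDICT (by name: the statement is the Claim_ definition above) =====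
theorem can_enter_cave_spec : Claim_equal_can_enter_cave := by
  intro x _ hpre
  unfold Spec_can_enter_cave
  obtain ⟨hne, hcase⟩ := hpre
  match x with
  | [] => decide
  | r0 :: rx =>
    rcases hcase with hrect | hw1 | hnz
    · have hw : 0 < pvW (r0 :: rx) := by
        have h1 := hne r0 (by simp)
        have h2 := hrect r0 (by simp)
        unfold pvW
        omega
      obtain ⟨hv, hmono, _⟩ := pvInit_ok (r0 :: rx)
      rw [Bool.eq_iff_iff, can_enter_cave,
        pvLoop_eq (r0 :: rx) hrect _ _ hv hmono (Nat.lt_succ_self _)]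
      exact pvB_eq (r0 :: rx) (by simp) hrect hw
    · exact pvW1_case (r0 :: rx) (by simp) hw1
    · exact pvNoZero_case (r0 :: rx) hnz
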